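-- pv_equiv track=rewrite | github.com/ysbiyiklioglu/Deepfake-detection | deepfake detection/app.py | find_real_index
-- ===== SOURCE A (Python) =====
-- def find_real_index(class_names):
--     lower = [c.lower() for c in class_names]
--     for key in ("original", "real"):
--         if key in lower:
--             return lower.index(key)
--     # binary modelde genelde 0 = real varsayımı
--     if len(class_names) == 2:
--         return 0
--     return 0  # fallback (en azından app çalışsın)
-- ===== SOURCE B (Python) =====
-- def find_real_index(class_names):
--     orig_idx = None
--     real_idx = None
--     for i, c in enumerate(class_names):
--         lc = c.lower()
--         if lc == "original" and orig_idx is None: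
--             orig_idx = i
--         elif lc == "real" and real_idx is None:
--             real_idx = i
--     if orig_idx is not None:
--         return orig_idx
--     if real_idx is not None:
--         return real_idx
--     return 0
-- ===== Notes on version B (the rewrite author's own statement) =====
-- stated objective: alternative
-- what changed: Single enumerate pass recording the first positions of 'original' and 'real' in two accumulators, deciding priority after the loop, instead of a per-key membership test plus a .index re-scan over a prebuilt lowered list.
import Mathlib
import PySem

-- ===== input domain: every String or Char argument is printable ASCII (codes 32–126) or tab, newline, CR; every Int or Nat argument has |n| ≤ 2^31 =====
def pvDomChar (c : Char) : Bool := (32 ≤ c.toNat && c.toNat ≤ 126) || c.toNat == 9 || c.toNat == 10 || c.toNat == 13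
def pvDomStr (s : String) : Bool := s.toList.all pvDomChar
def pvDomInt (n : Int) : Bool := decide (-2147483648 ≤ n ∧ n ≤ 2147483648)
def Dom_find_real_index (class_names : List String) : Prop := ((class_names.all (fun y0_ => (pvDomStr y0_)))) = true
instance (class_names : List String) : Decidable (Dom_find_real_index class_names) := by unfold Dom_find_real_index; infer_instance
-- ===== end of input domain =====

-- B: one enumerate pass keeping the first index of 'original' and of 'real', priority decided after the loop (alternative decomposition, same cost).

-- ===== PORT A =====
def find_real_index (class_names : List String) : Int :=
  let lower := class_names.map PySem.Str.lower
  if "original" ∈ lower then ((PySem.List.index? lower "original").getD 0 : Nat)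
  else if "real" ∈ lower then ((PySem.List.index? lower "real").getD 0 : Nat)
  else if class_names.length = 2 then 0
  else 0

-- ===== PORT B =====
def pvAltStep (st : Option Int × Option Int) (p : Int × String) : Option Int × Option Int :=
  let lc := PySem.Str.lower p.2
  if lc = "original" ∧ st.1 = none then (some p.1, st.2)
  else if lc = "real" ∧ st.2 = none then (st.1, some p.1)
  else st

def find_real_index_alt (class_names : List String) : Int :=
  let st := (PySem.List.enumerate class_names 0).foldl pvAltStep (none, none)
  match st.1 with
  | some i => i
  | none =>
    match st.2 with
    | some i => i
    | none => 0

-- ===== PRECONDITION & SPEC =====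
def Spec_find_real_index (class_names : List String) (out : Int) : Prop := out = find_real_index_alt class_names
instance (class_names : List String) (out : Int) : Decidable (Spec_find_real_index class_names out) := by unfold Spec_find_real_index; infer_instance

-- ===== CLAIM (what is proved, stated in full; the proofs are below) =====
def Claim_equal_find_real_index : Prop := ∀ (class_names : List String), Dom_find_real_index class_names → Spec_find_real_index class_names (find_real_index class_names)


-- ===== LEMMAS AND PROOFS =====

theorem pvShift (t : Option Nat) (s : Int) :
    (Option.map (fun k : Nat => (s + 1) + (k : Int)) t)
      = Option.map (fun k : Nat => s + (k : Int)) (Option.map (fun k => k + 1) t) := by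
  cases t with
  | none => rfl
  | some k => simp; ring

theorem pvFold_char (xs : List String) : ∀ (s : Int) (st : Option Int × Option Int),
    (PySem.List.enumerate xs s).foldl pvAltStep st =
      ((st.1.orElse fun _ => Option.map (fun k : Nat => s + (k : Int)) (PySem.List.index? (xs.map PySem.Str.lower) "original")),
       (st.2.orElse fun _ => Option.map (fun k : Nat => s + (k : Int)) (PySem.List.index? (xs.map PySem.Str.lower) "real"))) := by
  induction xs with
  | nil =>
    intro s st
    rw [PySem.List.enumerate_nil, List.foldl_nil]
    cases st with
    | mk o r => cases o <;> cases r <;> rfl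
  | cons x xs ih =>
    intro s st
    rw [PySem.List.enumerate_cons, List.foldl_cons, ih (s + 1) (pvAltStep st (s, x)),
        List.map_cons]
    by_cases h1 : PySem.Str.lower x = "original"
    · have h2 : PySem.Str.lower x ≠ "real" := by rw [h1]; decide
      rw [h1, PySem.List.index?_cons_self,
          PySem.List.index?_cons_of_ne _ (h1 ▸ h2), pvShift]
      by_cases ho : st.1 = none
      · have : pvAltStep st (s, x) = (some s, st.2) := by
          simp [pvAltStep, h1, ho]
        rw [this]
        cases hr : st.2 <;> simp [ho, Option.orElse] <;> (congr 1; funext k; simp only [Function.comp_apply]; push_cast; ring)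
      · obtain ⟨a, ha⟩ := Option.ne_none_iff_exists'.mp ho
        have : pvAltStep st (s, x) = st := by
          simp [pvAltStep, h1, h2, ha]
        rw [this]
        cases hr : st.2 <;> simp [ha, Option.orElse] <;> (congr 1; funext k; simp only [Function.comp_apply]; push_cast; ring)
    · rw [PySem.List.index?_cons_of_ne _ h1, pvShift]
      by_cases h2 : PySem.Str.lower x = "real"
      · rw [h2, PySem.List.index?_cons_self]
        by_cases hr : st.2 = none
        · have : pvAltStep st (s, x) = (st.1, some s) := by
            simp [pvAltStep, h1, h2, hr]
          rw [this]
          cases hho : st.1 <;> simp [hr, Option.orElse]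
        · obtain ⟨a, ha⟩ := Option.ne_none_iff_exists'.mp hr
          have : pvAltStep st (s, x) = st := by
            simp [pvAltStep, h1, h2, ha]
          rw [this]
          cases hho : st.1 <;> simp [ha, Option.orElse]
      · rw [PySem.List.index?_cons_of_ne _ (fun h => h2 h), pvShift]
        have : pvAltStep st (s, x) = st := by
          simp [pvAltStep, h1, h2]
        rw [this]

-- ===== VERDICT (by name: the statement is the Claim_ definition above) =====
theorem find_real_index_spec : Claim_equal_find_real_index := by
  intro class_names _
  unfold Spec_find_real_index find_real_index find_real_index_alt
  rw [pvFold_char]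
  by_cases h1 : "original" ∈ class_names.map PySem.Str.lower
  · obtain ⟨k, hk⟩ := Option.isSome_iff_exists.mp
      ((PySem.List.index?_isSome_iff (class_names.map PySem.Str.lower) "original").2 h1)
    rw [PySem.List.index?_eq_idxOf?] at hk
    simp [h1, hk, Option.orElse]
  · have ho : PySem.List.index? (class_names.map PySem.Str.lower) "original" = none :=
      (PySem.List.index?_eq_none_iff _ _).2 h1
    rw [PySem.List.index?_eq_idxOf?] at ho
    by_cases h2 : "real" ∈ class_names.map PySem.Str.lower
    · obtain ⟨k, hk⟩ := Option.isSome_iff_exists.mp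
        ((PySem.List.index?_isSome_iff (class_names.map PySem.Str.lower) "real").2 h2)
      rw [PySem.List.index?_eq_idxOf?] at hk
      simp [h1, h2, ho, hk, Option.orElse]
    · have hr : PySem.List.index? (class_names.map PySem.Str.lower) "real" = none :=
        (PySem.List.index?_eq_none_iff _ _).2 h2
      rw [PySem.List.index?_eq_idxOf?] at hr
      simp [h1, h2, ho, hr, Option.orElse]
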